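-- pv_equiv track=rewrite | github.com/jyajoo/Problem-Solving | Programmers/Lesson/121687.py | solution
-- ===== SOURCE A (Python) =====
-- def solution(command):
--     direction = ['w', 'd', 's', 'a']
--     G = [[0, 1], [1, 0], [0, -1], [-1, 0]]
--     answer = []
--     x = 0
--     y = 0
--     idx = 0
--     for i in command:
--         if i == "R":
--             idx += 1
--             if idx == 4:
--                 idx = 0
--         elif i == "L":
--             idx -= 1
--             if idx == -1:
--                 idx = 3
--         elif i == "G":
--             x += G[idx][0]
--             y += G[idx][1]
--         elif i == "B":
--             x -= G[idx][0]
--             y -= G[idx][1]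
--
--     answer = [x, y]
--     return answer
-- ===== SOURCE B (Python) =====
-- def solution(command):
--     # Process the commands BACK-TO-FRONT: (x, y) is the displacement produced by
--     # the suffix already processed, expressed in the frame current at that point.
--     # Prepending a turn re-expresses that displacement in the outer frame by
--     # rotating the whole accumulated point; prepending a move shifts it forward
--     # or backward along the frame's own axis. No heading state is kept at all.
--     x, y = 0, 0
--     for c in reversed(command):
--         if c == "R":
--             x, y = y, -x
--         elif c == "L":
--             x, y = -y, x
--         elif c == "G":
--             y += 1
--         elif c == "B":
--             y -= 1
--     return [x, y]
-- ===== Notes on version B (the rewrite author's own statement) =====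
-- stated objective: alternative
-- what changed: Instead of simulating forward with a heading state (direction index plus table), B scans the commands back-to-front keeping only the accumulated displacement point, rotating that whole point on R/L and shifting it on G/B, so no heading/direction state exists at all.
import Mathlib
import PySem

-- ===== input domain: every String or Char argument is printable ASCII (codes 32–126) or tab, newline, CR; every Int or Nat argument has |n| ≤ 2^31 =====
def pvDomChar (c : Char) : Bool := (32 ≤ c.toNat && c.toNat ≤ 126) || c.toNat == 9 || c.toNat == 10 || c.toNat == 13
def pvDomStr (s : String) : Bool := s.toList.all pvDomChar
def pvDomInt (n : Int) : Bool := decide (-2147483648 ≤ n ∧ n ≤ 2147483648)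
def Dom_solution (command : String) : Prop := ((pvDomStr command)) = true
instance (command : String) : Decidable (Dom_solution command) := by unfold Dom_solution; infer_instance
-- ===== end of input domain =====

-- B drops A's forward simulation with a heading index: it scans the commands back-to-front,
-- keeping only the accumulated displacement point, rotating it on turns; same O(n) cost.

-- ===== PORT A =====
-- Python's G table; lookups G[idx][k] are ported with pyGet?+getD: exact since A keeps idx in 0..3,
-- so the lookup never falls back to the default.
def solG : List (List Int) := [[0, 1], [1, 0], [0, -1], [-1, 0]]

def solGet (idx k : Int) : Int :=
  (PySem.List.pyGet? ((PySem.List.pyGet? solG idx).getD []) k).getD 0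

def solStepA (s : Int × Int × Int) (i : Char) : Int × Int × Int :=
  let x := s.1; let y := s.2.1; let idx := s.2.2
  if i = 'R' then
    let idx := idx + 1
    let idx := if idx = 4 then 0 else idx
    (x, y, idx)
  else if i = 'L' then
    let idx := idx - 1
    let idx := if idx = -1 then 3 else idx
    (x, y, idx)
  else if i = 'G' then
    (x + solGet idx 0, y + solGet idx 1, idx)
  else if i = 'B' then
    (x - solGet idx 0, y - solGet idx 1, idx)
  else (x, y, idx)

def solution (command : String) : List Int :=
  let r := command.toList.foldl solStepA (0, 0, 0)
  [r.1, r.2.1]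

-- ===== PORT B =====
-- state: the accumulated displacement point (x, y); commands are consumed in reverse
def solStepB (p : Int × Int) (c : Char) : Int × Int :=
  if c = 'R' then (p.2, -p.1)
  else if c = 'L' then (-p.2, p.1)
  else if c = 'G' then (p.1, p.2 + 1)
  else if c = 'B' then (p.1, p.2 - 1)
  else p

def solution_alt (command : String) : List Int :=
  let r := command.toList.reverse.foldl solStepB (0, 0)
  [r.1, r.2]

-- ===== PRECONDITION & SPEC =====
def Spec_solution (command : String) (out : List Int) : Prop := out = solution_alt command
instance (command : String) (out : List Int) : Decidable (Spec_solution command out) := by unfold Spec_solution; infer_instance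

-- ===== CLAIM (what is proved, stated in full; the proofs are below) =====
def Claim_equal_solution : Prop := ∀ (command : String), Dom_solution command → Spec_solution command (solution command)

-- ===== LEMMAS AND PROOFS =====

-- frame map of A's direction index: coordinates of a point of B's frame in the outer frame
def solRot (idx : Int) (p : Int × Int) : Int × Int :=
  if idx = 0 then p
  else if idx = 1 then (p.2, -p.1)
  else if idx = 2 then (-p.1, -p.2)
  else (-p.2, p.1)

-- B's right-fold form of the reversed loop
def solSufB (l : List Char) : Int × Int := l.foldr (fun c acc => solStepB acc c) (0, 0)

theorem sol_step (x y idx a b : Int)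
    (h : idx = 0 ∨ idx = 1 ∨ idx = 2 ∨ idx = 3) (c : Char) :
    ((solStepA (x, y, idx) c).2.2 = 0 ∨ (solStepA (x, y, idx) c).2.2 = 1 ∨
      (solStepA (x, y, idx) c).2.2 = 2 ∨ (solStepA (x, y, idx) c).2.2 = 3) ∧
    ((solStepA (x, y, idx) c).1 + (solRot (solStepA (x, y, idx) c).2.2 (a, b)).1,
     (solStepA (x, y, idx) c).2.1 + (solRot (solStepA (x, y, idx) c).2.2 (a, b)).2) =
      (x + (solRot idx (solStepB (a, b) c)).1, y + (solRot idx (solStepB (a, b) c)).2) := by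
  rcases h with h | h | h | h <;> subst h <;>
    by_cases hR : c = 'R' <;> by_cases hL : c = 'L' <;>
    by_cases hG : c = 'G' <;> by_cases hB : c = 'B' <;>
    simp [solStepA, solStepB, solRot, solGet, solG, PySem.List.pyGet?,
      PySem.List.pyIdx?, hR, hL, hG, hB] <;> ring

theorem sol_inv (l : List Char) (x y idx : Int)
    (h : idx = 0 ∨ idx = 1 ∨ idx = 2 ∨ idx = 3) :
    ((l.foldl solStepA (x, y, idx)).1, (l.foldl solStepA (x, y, idx)).2.1) =
      (x + (solRot idx (solSufB l)).1, y + (solRot idx (solSufB l)).2) := by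
  induction l generalizing x y idx with
  | nil =>
    rcases h with h | h | h | h <;> subst h <;> simp [solSufB, solRot]
  | cons c t ih =>
    have hsuf : solSufB (c :: t) = solStepB (solSufB t) c := rfl
    obtain ⟨h1, h2⟩ := sol_step x y idx (solSufB t).1 (solSufB t).2 h c
    simp only [List.foldl_cons]
    rw [ih _ _ _ h1, hsuf]
    simpa using h2

-- ===== VERDICT (by name: the statement is the Claim_ definition above) =====
theorem solution_spec : Claim_equal_solution := by
  intro command _
  unfold Spec_solution solution solution_alt
  dsimp only
  rw [List.foldl_reverse]
  have h := sol_inv command.toList 0 0 0 (Or.inl rfl)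
  simp only [solRot, reduceIte, Prod.mk.injEq, zero_add] at h
  rw [h.1, h.2]
  rfl
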